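-- pv_equiv track=rewrite | github.com/carlosm22700/mastermind_game | main_app/views.py | process_guess
-- ===== SOURCE A (Python) =====
-- def process_guess(user_guess, winning_combination):
--     correct_positions = [i for i in range(
--         4) if user_guess[i] == winning_combination[i]]  # This line creates an list of indices where the numbers match exactly between user_guess and the winning_combination
--     correct_count = len(correct_positions)
--     correct_position = correct_count
--
--     # The following lines create new lists excluding the digits that have already been matched in the correct positions.
--     unmatched_winning = [winning_combination[i]  # This is the winning combination with the correct positions removed
--                          for i in range(4) if i not in correct_positions]
--     unmatched_guess = [user_guess[i]  # THis is the user's guess without the correctly positions digits.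
--                        for i in range(4) if i not in correct_positions]
--
--     # Iterate over the unmatched digits from the user's guess. If the digit is found in 'unmatched_winning'. increase correct_count by 1 and the remove that digit from unmatched_winning. This prevents double counting because the same digit can't be matched twice.
--     for digit in unmatched_guess:
--         if digit in unmatched_winning:
--             correct_count += 1
--             # Remove matched digit to prevent double counting
--             unmatched_winning.remove(digit)
--
--     return correct_count, correct_position
-- ===== SOURCE B (Python) =====
-- def process_guess(user_guess, winning_combination):
--     g = [user_guess[i] for i in range(4)]
--     w = [winning_combination[i] for i in range(4)]
--     exact = sum(1 for a, b in zip(g, w) if a == b)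
--     total = sum(min(g.count(v), w.count(v)) for v in set(g))
--     return total, exact
-- ===== Notes on version B (the rewrite author's own statement) =====
-- stated objective: idiomatic
-- what changed: Replaces the exact-position removal lists and the greedy membership/remove loop with a direct multiset-intersection count (sum of per-value min of counts) plus a positional equality sum.
import Mathlib
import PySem

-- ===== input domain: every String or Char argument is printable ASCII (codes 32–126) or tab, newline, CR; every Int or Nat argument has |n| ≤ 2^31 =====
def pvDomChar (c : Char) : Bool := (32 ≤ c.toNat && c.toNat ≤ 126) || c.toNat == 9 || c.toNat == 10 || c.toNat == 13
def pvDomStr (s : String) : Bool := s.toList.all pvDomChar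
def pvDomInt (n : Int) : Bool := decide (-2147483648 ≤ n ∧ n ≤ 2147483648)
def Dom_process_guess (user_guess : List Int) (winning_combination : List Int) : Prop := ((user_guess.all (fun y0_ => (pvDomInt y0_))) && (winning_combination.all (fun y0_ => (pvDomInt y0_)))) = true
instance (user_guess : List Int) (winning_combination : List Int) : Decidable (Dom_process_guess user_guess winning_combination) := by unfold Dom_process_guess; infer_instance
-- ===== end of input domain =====

-- B replaces A's removal lists and greedy remove-loop by a positional equality sum plus a
-- per-value min-of-counts (multiset intersection) sum — more idiomatic, same cost.

-- ===== PORT A =====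
-- A-side helper: the body of A's for-loop ('if digit in unmatched_winning: count += 1; remove')
def stepA (st : Int × List Int) (digit : Int) : Int × List Int :=
  if st.2.contains digit then (st.1 + 1, (PySem.List.remove? st.2 digit).getD st.2)
  else st

-- literal transliteration of A; element access user_guess[i] is PySem.List.pyGetD,
-- exact under Pre_ (both lists have length ≥ 4, otherwise Python raises IndexError)
def process_guess (user_guess : List Int) (winning_combination : List Int) : Int × Int :=
  let correct_positions : List Int := (PySem.List.pyRange 0 4 1).filter
    (fun i => PySem.List.pyGetD user_guess i 0 == PySem.List.pyGetD winning_combination i 0)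
  let correct_count : Int := correct_positions.length
  let correct_position : Int := correct_count
  let unmatched_winning : List Int := ((PySem.List.pyRange 0 4 1).filter
    (fun i => !(correct_positions.contains i))).map
      (fun i => PySem.List.pyGetD winning_combination i 0)
  let unmatched_guess : List Int := ((PySem.List.pyRange 0 4 1).filter
    (fun i => !(correct_positions.contains i))).map
      (fun i => PySem.List.pyGetD user_guess i 0)
  let st := unmatched_guess.foldl stepA (correct_count, unmatched_winning)
  (st.1, correct_position)

-- ===== PORT B =====
def process_guess_alt (user_guess : List Int) (winning_combination : List Int) : Int × Int :=
  let g : List Int := (PySem.List.pyRange 0 4 1).map (fun i => PySem.List.pyGetD user_guess i 0)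
  let w : List Int := (PySem.List.pyRange 0 4 1).map (fun i => PySem.List.pyGetD winning_combination i 0)
  let exact : Int := ((g.zip w).filter (fun p => p.1 == p.2)).length
  let total : Int := (PySem.Set.ofList g).foldl
    (fun acc v => acc + min ((PySem.List.count g v : Int)) ((PySem.List.count w v : Int))) 0
  (total, exact)

-- ===== PRECONDITION & SPEC =====
-- Python A raises IndexError when either list has fewer than 4 elements; Pre_ excludes exactly those.
def Pre_process_guess (user_guess : List Int) (winning_combination : List Int) : Prop :=
  4 ≤ user_guess.length ∧ 4 ≤ winning_combination.length
instance (user_guess : List Int) (winning_combination : List Int) : Decidable (Pre_process_guess user_guess winning_combination) := by unfold Pre_process_guess; infer_instance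
def pvWitness_process_guess : List Int × List Int := ([1, 2, 3, 4], [1, 3, 2, 5])

def Spec_process_guess (user_guess : List Int) (winning_combination : List Int) (out : Int × Int) : Prop := out = process_guess_alt user_guess winning_combination
instance (user_guess : List Int) (winning_combination : List Int) (out : Int × Int) : Decidable (Spec_process_guess user_guess winning_combination out) := by unfold Spec_process_guess; infer_instance

-- ===== CLAIM (what is proved, stated in full; the proofs are below) =====
def Claim_equal_process_guess : Prop := ∀ (user_guess : List Int) (winning_combination : List Int), Dom_process_guess user_guess winning_combination → Pre_process_guess user_guess winning_combination → Spec_process_guess user_guess winning_combination (process_guess user_guess winning_combination)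

-- ===== LEMMAS AND PROOFS =====

-- the loop body, as an if over plain membership
theorem stepA_eq (c : Int) (uw : List Int) (d : Int) :
    stepA (c, uw) d = if d ∈ uw then (c + 1, uw.erase d) else (c, uw) := by
  by_cases h : d ∈ uw
  · simp [stepA, h, PySem.List.remove?_eq_some_erase uw d h]
  · simp [stepA, h]

-- A's greedy remove-loop counts the cardinality of the multiset intersection.
theorem greedy_loop_card (ug : List Int) : ∀ (uw : List Int) (c : Int),
    (ug.foldl stepA (c, uw)).1 = c + (((ug : Multiset Int)) ∩ (uw : Multiset Int)).card := by
  induction ug with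
  | nil => intro uw c; simp
  | cons d tl ih =>
    intro uw c
    rw [List.foldl_cons, stepA_eq]
    by_cases h : d ∈ uw
    · rw [if_pos h, ih (uw.erase d) (c + 1)]
      have : ((d :: tl : List Int) : Multiset Int) ∩ (uw : Multiset Int)
          = d ::ₘ ((tl : Multiset Int) ∩ ((uw : Multiset Int).erase d)) := by
        rw [← Multiset.cons_coe]
        exact Multiset.cons_inter_of_pos _ h
      rw [this, Multiset.card_cons, Multiset.coe_erase]
      push_cast
      ring
    · rw [if_neg h, ih uw c]
      have : ((d :: tl : List Int) : Multiset Int) ∩ (uw : Multiset Int)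
          = (tl : Multiset Int) ∩ (uw : Multiset Int) := by
        rw [← Multiset.cons_coe]
        exact Multiset.cons_inter_of_neg _ h
      rw [this]

-- B's per-distinct-value min-of-counts sum is the same cardinality.
theorem min_counts_card (g w : List Int) :
    ((PySem.Set.ofList g).foldl
      (fun acc v => acc + min ((PySem.List.count g v : Int)) ((PySem.List.count w v : Int))) 0)
    = (((g : Multiset Int)) ∩ (w : Multiset Int)).card := by
  rw [PySem.List.foldl_add]
  have hnd := PySem.Set.nodup_ofList g
  rw [← List.sum_toFinset _ hnd]
  have hfs : (PySem.Set.ofList g).toFinset = g.toFinset := by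
    ext v
    simp [PySem.Set.mem_ofList]
  rw [hfs]
  have hcount : ∀ v : Int,
      min ((PySem.List.count g v : Int)) ((PySem.List.count w v : Int))
      = ((Multiset.count v ((g : Multiset Int) ∩ (w : Multiset Int)) : Int)) := by
    intro v
    rw [Multiset.count_inter]
    simp [PySem.List.count_eq, Nat.cast_min, Multiset.coe_count]
  calc 0 + ∑ v ∈ g.toFinset, min ((PySem.List.count g v : Int)) ((PySem.List.count w v : Int))
      = ∑ v ∈ g.toFinset, ((Multiset.count v ((g : Multiset Int) ∩ (w : Multiset Int)) : Int)) := by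
        rw [zero_add]; exact Finset.sum_congr rfl (fun v _ => hcount v)
    _ = (((∑ v ∈ g.toFinset, Multiset.count v ((g : Multiset Int) ∩ (w : Multiset Int))) : Nat) : Int) := by
        push_cast; ring
    _ = (((g : Multiset Int) ∩ (w : Multiset Int)).card : Int) := by
        congr 1
        rw [← Multiset.toFinset_sum_count_eq ((g : Multiset Int) ∩ (w : Multiset Int))]
        apply (Finset.sum_subset _ _).symm
        · intro v hv
          simp only [Multiset.mem_toFinset, Multiset.mem_inter] at hv
          simp [List.mem_toFinset, ← Multiset.mem_coe, hv.1]
        · intro v _ hv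
          rw [Multiset.count_eq_zero]
          simpa [Multiset.mem_toFinset] using hv

-- intersection distributes over a common multiset summand
theorem inter_add_left (m s t : Multiset Int) : (m + s) ∩ (m + t) = m + s ∩ t := by
  ext v
  simp only [Multiset.count_inter, Multiset.count_add]
  omega

-- the main identity, stated over the list of position pairs
theorem pairs_identity (p : List (Int × Int)) (c : Int)
    (hc : c = ((p.filter (fun q => q.1 == q.2)).length : Int)) :
    (((p.filter (fun q => !(q.1 == q.2))).map Prod.fst).foldl stepA
      (c, (p.filter (fun q => !(q.1 == q.2))).map Prod.snd)).1
    = (((p.map Prod.fst : List Int) : Multiset Int) ∩ ((p.map Prod.snd : List Int) : Multiset Int)).card := by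
  rw [greedy_loop_card]
  have hm : (p.filter (fun q => q.1 == q.2)).map Prod.snd
      = (p.filter (fun q => q.1 == q.2)).map Prod.fst := by
    apply List.map_congr_left
    intro q hq
    have := (List.mem_filter.mp hq).2
    simpa [eq_comm] using (beq_iff_eq.mp this).symm
  have hg : ((p.map Prod.fst : List Int) : Multiset Int)
      = ((p.filter (fun q => q.1 == q.2)).map Prod.fst : List Int)
        + ((p.filter (fun q => !(q.1 == q.2))).map Prod.fst : List Int) := by
    rw [Multiset.coe_add]
    apply (Multiset.coe_eq_coe.mpr _).symm
    rw [← List.map_append]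
    exact (List.filter_append_perm _ p).map Prod.fst
  have hw : ((p.map Prod.snd : List Int) : Multiset Int)
      = ((p.filter (fun q => q.1 == q.2)).map Prod.fst : List Int)
        + ((p.filter (fun q => !(q.1 == q.2))).map Prod.snd : List Int) := by
    rw [Multiset.coe_add]
    apply (Multiset.coe_eq_coe.mpr _).symm
    rw [← hm, ← List.map_append]
    exact (List.filter_append_perm _ p).map Prod.snd
  rw [hg, hw, inter_add_left, Multiset.card_add, hc]
  push_cast
  simp [Multiset.coe_card]

-- ===== VERDICT (by name: the statement is the Claim_ definition above) =====
theorem process_guess_spec : Claim_equal_process_guess := by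
  intro u w _ _
  unfold Spec_process_guess process_guess process_guess_alt
  have hr : PySem.List.pyRange 0 4 1 = [0, 1, 2, 3] := by decide
  set a : Int → Int := fun i => PySem.List.pyGetD u i 0 with ha
  set b : Int → Int := fun i => PySem.List.pyGetD w i 0 with hb
  set P : Int → Bool := fun i => a i == b i with hP
  -- the pairs list
  set p : List (Int × Int) := [0, 1, 2, 3].map (fun i => (a i, b i)) with hp
  -- unmatched-index filter equals the ¬P filter (indices of the range are distinct)
  have hidx : ([0, 1, 2, 3] : List Int).filter
      (fun i => !(([0, 1, 2, 3].filter P).contains i)) = [0, 1, 2, 3].filter (fun i => !(P i)) := by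
    apply List.filter_congr
    intro i hi
    have : (([0, 1, 2, 3].filter P).contains i) = P i := by
      simp only [List.contains_eq_mem, List.mem_filter]
      fin_cases hi <;> simp
    rw [this]
  simp only [hr, hidx]
  refine Prod.ext ?_ ?_
  · -- first components
    have hfg : ([0, 1, 2, 3].filter (fun i => !(P i))).map a
        = (p.filter (fun q => !(q.1 == q.2))).map Prod.fst := by
      rw [hp, List.filter_map]; simp [Function.comp_def, hP]
    have hfw : ([0, 1, 2, 3].filter (fun i => !(P i))).map b
        = (p.filter (fun q => !(q.1 == q.2))).map Prod.snd := by
      rw [hp, List.filter_map]; simp [Function.comp_def, hP]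
    have hlen : (([0, 1, 2, 3].filter P).length : Int)
        = ((p.filter (fun q => q.1 == q.2)).length : Int) := by
      rw [hp, List.filter_map, List.length_map]; simp [Function.comp_def, hP]
    rw [hfg, hfw, pairs_identity p _ hlen]
    rw [min_counts_card]
    congr 1
  · -- second components: both are the positional equality count
    rw [List.zip_map']
    simp only [List.filter_map, List.length_map, Function.comp_def]
    rw [hP]
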